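-- pv_equiv track=rewrite | github.com/Avinash-Tamarapalli/my_learnings_ContextLogicProject | Python_handson/odd_man_out.py | remove_odd_characters
-- ===== SOURCE A (Python) =====
-- def func(n):
--     if n%2==0:
--         return False
--     else:
--         return True
--
-- def remove_odd_characters(my_string):
--     new_str=my_string
--     for i in my_string:
--         n=my_string.count(i)
--         if func(n) is True:
--             new_str=new_str.replace(i,"")
--         else:
--             pass
--     return new_str
-- ===== SOURCE B (Python) =====
-- def remove_odd_characters(my_string):
--     counts = {}
--     for c in my_string:
--         counts[c] = counts.get(c, 0) + 1
--     return ''.join(c for c in my_string if counts[c] % 2 == 0)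
-- ===== Notes on version B (the rewrite author's own statement) =====
-- stated objective: simpler
-- what changed: Replaces A's per-character count-and-replace deletion loop (repeated .count and .replace passes) with one pass building a frequency dict followed by a single order-preserving filter/join over the string.
import Mathlib
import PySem

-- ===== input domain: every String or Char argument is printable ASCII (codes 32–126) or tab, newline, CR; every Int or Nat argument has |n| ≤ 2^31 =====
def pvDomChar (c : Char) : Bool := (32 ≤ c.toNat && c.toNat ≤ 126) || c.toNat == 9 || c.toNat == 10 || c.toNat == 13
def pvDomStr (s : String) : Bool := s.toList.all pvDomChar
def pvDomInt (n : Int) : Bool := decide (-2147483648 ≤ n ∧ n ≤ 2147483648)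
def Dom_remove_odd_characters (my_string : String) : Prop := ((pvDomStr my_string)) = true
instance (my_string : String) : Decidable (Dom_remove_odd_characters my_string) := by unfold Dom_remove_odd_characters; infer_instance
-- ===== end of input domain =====

-- B replaces the count-and-replace deletion loop with a frequency dict built in one pass plus an order-preserving filter (simpler, and linear instead of quadratic in practice).

-- ===== PORT A =====
-- helper 'func' from the same module (odd test)
def func (n : Int) : Bool := if PySem.Int.mod n 2 == 0 then false else true

def remove_odd_characters (my_string : String) : String :=
  my_string.toList.foldl
    (fun new_str i =>
      let n : Int := (PySem.Str.count my_string (String.singleton i) : Int)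
      if func n = true then PySem.Str.replace new_str (String.singleton i) "" else new_str)
    my_string

-- ===== PORT B =====
def remove_odd_characters_alt (my_string : String) : String :=
  let counts : PySem.Dict Char Int :=
    my_string.toList.foldl (fun d c => d.insert c (d.getD c 0 + 1)) PySem.Dict.empty
  String.ofList (my_string.toList.filter (fun c => PySem.Int.mod (counts.getD c 0) 2 == 0))

-- ===== PRECONDITION & SPEC =====
def Spec_remove_odd_characters (my_string : String) (out : String) : Prop := out = remove_odd_characters_alt my_string
instance (my_string : String) (out : String) : Decidable (Spec_remove_odd_characters my_string out) := by unfold Spec_remove_odd_characters; infer_instance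

-- ===== CLAIM (what is proved, stated in full; the proofs are below) =====
def Claim_equal_remove_odd_characters : Prop := ∀ (my_string : String), Dom_remove_odd_characters my_string → Spec_remove_odd_characters my_string (remove_odd_characters my_string)

-- ===== LEMMAS AND PROOFS =====

-- 'even count in the original string' predicate, the characterisation both ports reduce to
def pvEven (cs : List Char) (c : Char) : Bool := PySem.Int.mod (cs.count c : Int) 2 == 0

lemma count_go_single (c : Char) : ∀ (l : List Char) (fuel acc : Nat), l.length ≤ fuel →
    PySem.Chars.count.go [c] fuel l acc = acc + l.count c := by
  intro l
  induction l with
  | nil => intro fuel acc _; cases fuel <;> simp [PySem.Chars.count.go]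
  | cons h t ih =>
    intro fuel acc hf
    cases fuel with
    | zero => simp at hf
    | succ f =>
      by_cases hc : c = h
      · subst hc
        simp only [PySem.Chars.count.go, List.isPrefixOf, BEq.rfl, Bool.and_self, if_true,
          List.length_cons, List.drop_succ_cons, List.length_nil, List.drop_zero,
          List.count_cons_self]
        rw [ih f (acc + 1) (by simpa using hf)]
        omega
      · have hpre : ([c].isPrefixOf (h :: t)) = false := by
          simp [List.isPrefixOf]
          exact hc
        simp only [PySem.Chars.count.go, hpre]
        rw [ih f acc (by simpa using hf)]
        simp [Ne.symm hc]

lemma chars_count_single (l : List Char) (c : Char) :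
    PySem.Chars.count l [c] = l.count c := by
  simp [PySem.Chars.count, count_go_single c l l.length 0 le_rfl]

lemma replace_go_single (c : Char) : ∀ (l : List Char) (fuel : Nat) (acc : List Char), l.length ≤ fuel →
    PySem.Chars.replace.go [c] [] fuel l acc = acc.reverse ++ l.filter (fun x => x != c) := by
  intro l
  induction l with
  | nil => intro fuel acc _; cases fuel <;> simp [PySem.Chars.replace.go]
  | cons h t ih =>
    intro fuel acc hf
    cases fuel with
    | zero => simp at hf
    | succ f =>
      by_cases hc : c = h
      · subst hc
        simp only [PySem.Chars.replace.go, List.isPrefixOf, BEq.rfl, Bool.and_self, if_true,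
          List.length_cons, List.drop_succ_cons, List.length_nil, List.drop_zero,
          List.reverse_nil, List.nil_append]
        rw [ih f acc (by simpa using hf)]
        simp
      · have hpre : ([c].isPrefixOf (h :: t)) = false := by
          simp [List.isPrefixOf]
          exact hc
        simp only [PySem.Chars.replace.go, hpre]
        rw [ih f (h :: acc) (by simpa using hf)]
        simp [bne, Ne.symm hc, beq_eq_false_iff_ne]

lemma chars_replace_single (l : List Char) (c : Char) :
    PySem.Chars.replace l [c] [] = l.filter (fun x => x != c) := by
  simp [PySem.Chars.replace, replace_go_single c l l.length [] le_rfl]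

lemma func_eq_not_pvEven (s : String) (i : Char) :
    func ((s.toList.count i : Int)) = !(pvEven s.toList i) := by
  simp only [func, pvEven]
  cases h : (PySem.Int.mod ((s.toList.count i : Int)) 2 == 0) <;> simp [h]

lemma str_count_single (s : String) (i : Char) :
    (PySem.Str.count s (String.singleton i) : Int) = (s.toList.count i : Int) := by
  rw [PySem.Str.count_eq]
  have h1 : (String.singleton i).toList = [i] := by simp [String.singleton]
  rw [h1, chars_count_single]

lemma loop_lemma (s : String) : ∀ (t : List Char) (p : Char → Bool),
    (∀ c, pvEven s.toList c = true → p c = true) →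
    (∀ c, c ∈ s.toList → p c = true → pvEven s.toList c = true ∨ c ∈ t) →
    t.foldl
      (fun new_str i =>
        let n : Int := (PySem.Str.count s (String.singleton i) : Int)
        if func n = true then PySem.Str.replace new_str (String.singleton i) "" else new_str)
      (String.ofList (s.toList.filter p))
    = String.ofList (s.toList.filter (pvEven s.toList)) := by
  intro t
  induction t with
  | nil =>
    intro p hp hcov
    simp only [List.foldl_nil]
    congr 1
    apply List.filter_congr
    intro c hc
    cases h : p c with
    | false =>
      cases h2 : pvEven s.toList c with
      | false => rfl
      | true => rw [hp c h2] at h; exact absurd h (by simp)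
    | true =>
      rcases hcov c hc h with h2 | h2
      · rw [h2]
      · simp at h2
  | cons i t ih =>
    intro p hp hcov
    simp only [List.foldl_cons]
    rw [str_count_single, func_eq_not_pvEven]
    cases hpe : pvEven s.toList i with
    | false =>
      -- odd count: the replace branch fires
      rw [Bool.not_false, if_pos rfl]
      have htl : (PySem.Str.replace (String.ofList (s.toList.filter p)) (String.singleton i) "").toList
          = s.toList.filter (fun c => p c && (c != i)) := by
        rw [PySem.Str.toList_replace]
        have h1 : (String.singleton i).toList = [i] := by simp [String.singleton]
        have h2 : ("" : String).toList = [] := rfl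
        rw [h1, h2, chars_replace_single]
        simp [List.filter_filter]
        exact List.filter_congr fun a _ => Bool.and_comm _ _
      have hrepl : PySem.Str.replace (String.ofList (s.toList.filter p)) (String.singleton i) ""
          = String.ofList (s.toList.filter (fun c => p c && (c != i))) := by
        calc PySem.Str.replace (String.ofList (s.toList.filter p)) (String.singleton i) ""
            = String.ofList ((PySem.Str.replace (String.ofList (s.toList.filter p)) (String.singleton i) "").toList) := (String.ofList_toList).symm
          _ = String.ofList (s.toList.filter (fun c => p c && (c != i))) := by rw [htl]
      rw [hrepl]
      apply ih
      · intro c hc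
        have h1 := hp c hc
        have h2 : (c != i) = true := by
          by_contra hne
          simp at hne
          subst hne
          rw [hc] at hpe
          exact absurd hpe (by simp)
        simp [h1, h2]
      · intro c hcm hc
        simp only [Bool.and_eq_true] at hc
        rcases hcov c hcm hc.1 with h | h
        · exact Or.inl h
        · rcases List.mem_cons.mp h with h | h
          · subst h; simp at hc
          · exact Or.inr h
    | true =>
      -- even count: no change
      rw [Bool.not_true, if_neg (by simp)]
      apply ih p hp
      intro c hcm hc
      rcases hcov c hcm hc with h | h
      · exact Or.inl h
      · rcases List.mem_cons.mp h with h | h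
        · subst h; exact Or.inl hpe
        · exact Or.inr h

lemma alt_eq (s : String) :
    remove_odd_characters_alt s = String.ofList (s.toList.filter (pvEven s.toList)) := by
  simp only [remove_odd_characters_alt]
  congr 1
  apply List.filter_congr
  intro c hc
  rw [PySem.Dict.getD_foldl_insert_add_one]
  simp [pvEven, PySem.Dict.empty, PySem.Dict.getD, PySem.Dict.get?]

-- ===== VERDICT (by name: the statement is the Claim_ definition above) =====
theorem remove_odd_characters_spec : Claim_equal_remove_odd_characters := by
  intro s _
  unfold Spec_remove_odd_characters remove_odd_characters
  rw [alt_eq]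
  have h := loop_lemma s s.toList (fun _ => true) (fun c _ => rfl) (fun c hc _ => Or.inr hc)
  simp only [List.filter_true, String.ofList_toList] at h
  exact h
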